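-- pv_equiv track=rewrite | github.com/rlayers/pawpaw | pawpaw/ontology/_query.py | descape
-- ===== SOURCE A (Python) =====
-- def descape(value: str) -> str:
--     rv = ''
--     esc = False
--     for c in value:
--         if esc or c != '\\':
--             rv += c
--             esc = False
--         else:
--             esc = True
--
--     if esc:
--         raise ValueError(f'found escape with no succeeding character in \'value\'')
--
--     return rv
-- ===== SOURCE B (Python) =====
-- def descape(value: str) -> str:
--     rv = []
--     i = 0
--     n = len(value)
--     while i < n:
--         c = value[i]
--         if c == '\\':
--             i += 1
--             if i >= n:
--                 raise ValueError(f'found escape with no succeeding character in \'value\'')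
--             rv.append(value[i])
--         else:
--             rv.append(c)
--         i += 1
--     return ''.join(rv)
-- ===== Notes on version B (the rewrite author's own statement) =====
-- stated objective: alternative
-- what changed: Replaces A's persistent boolean escape-state fold with an index-based while loop that, on a backslash, looks ahead and consumes the escaped character in the same iteration (raising the identical ValueError when the lookahead runs off the end).
import Mathlib
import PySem

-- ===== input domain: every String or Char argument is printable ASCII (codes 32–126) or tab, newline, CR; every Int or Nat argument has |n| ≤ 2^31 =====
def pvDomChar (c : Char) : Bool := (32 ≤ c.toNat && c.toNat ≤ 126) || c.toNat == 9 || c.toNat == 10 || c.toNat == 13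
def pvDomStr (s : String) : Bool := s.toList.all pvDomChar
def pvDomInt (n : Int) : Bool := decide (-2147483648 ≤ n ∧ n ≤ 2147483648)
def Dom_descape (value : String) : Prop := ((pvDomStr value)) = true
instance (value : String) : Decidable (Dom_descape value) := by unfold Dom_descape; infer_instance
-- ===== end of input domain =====

-- B replaces A's persistent boolean escape-state with an index/lookahead scan; objective: alternative decomposition (same O(n) cost).

-- ===== PORT A =====
-- A's for-loop over the characters with state (rv, esc); 'rv += c' is rv ++ [c].
def descapeLoop (rv : List Char) (esc : Bool) : List Char → List Char × Bool
  | [] => (rv, esc)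
  | c :: rest =>
    if esc || c ≠ '\\' then descapeLoop (rv ++ [c]) false rest
    else descapeLoop rv true rest

-- If esc is true at the end A raises ValueError; Pre_descape excludes exactly those inputs.
def descape (value : String) : String :=
  String.ofList (descapeLoop [] false value.toList).1

-- ===== PORT B =====
-- B's while loop with index lookahead: a backslash consumes itself and the next character.
def descapeGo : List Char → List Char
  | [] => []
  | c :: rest =>
    if c = '\\' then
      match rest with
      | [] => []            -- here B raises ValueError; excluded by Pre_descape
      | d :: rest' => d :: descapeGo rest'
    else c :: descapeGo rest

def descape_alt (value : String) : String :=
  String.ofList (descapeGo value.toList)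

-- ===== PRECONDITION & SPEC =====
-- Pre_ excludes exactly the inputs on which A (and B alike) raises ValueError:
-- strings ending in an odd run of backslashes (a trailing unmatched escape).
def Pre_descape (value : String) : Prop :=
  (value.toList.reverse.takeWhile (· = '\\')).length % 2 = 0
instance (value : String) : Decidable (Pre_descape value) := by unfold Pre_descape; infer_instance

def pvWitness_descape : String := "a\\bc"

def Spec_descape (value : String) (out : String) : Prop := out = descape_alt value
instance (value : String) (out : String) : Decidable (Spec_descape value out) := by unfold Spec_descape; infer_instance

-- ===== CLAIM (what is proved, stated in full; the proofs are below) =====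
def Claim_equal_descape : Prop := ∀ (value : String), Dom_descape value → Pre_descape value → Spec_descape value (descape value)

-- ===== LEMMAS AND PROOFS =====

-- A's loop, started with esc = false, accumulates exactly B's lookahead result
-- (the esc flag only governs whether A raises afterwards, not the string built).
theorem descapeLoop_fst (l : List Char) : ∀ rv : List Char,
    (descapeLoop rv false l).1 = rv ++ descapeGo l := by
  induction l using descapeGo.induct with
  | case1 => intro rv; simp [descapeLoop, descapeGo]
  | case2 => intro rv; simp [descapeLoop, descapeGo]
  | case3 d rest' ih =>
      intro rv
      by_cases hd : d = '\\' <;> simp [descapeLoop, descapeGo, hd, ih]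
  | case4 d rest' h ih =>
      intro rv
      simp only [descapeLoop, Bool.false_or]
      rw [if_pos (by simp [h]), ih]
      conv_rhs => rw [descapeGo.eq_def]
      simp [h]

-- ===== VERDICT (by name: the statement is the Claim_ definition above) =====
theorem descape_spec : Claim_equal_descape := by
  intro value _ _
  unfold Spec_descape descape descape_alt
  rw [descapeLoop_fst]
  simp
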